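/- GENERATED by mk_final_copies.py from the proof of the farm's unit `get_bits.24` (farm:get_bits.24.1: Proof.lean) as the
   re-elaboration sweep compiled it — do not edit. -/
import Asan.CheckWalk
import Vorbis.Spec.ReaderLemmas
import Vorbis.Spec.Units.get_bits_24
import Vorbis.Spec.Worked.get_bits_24_Lemmas

open X86 X86.User Asan Vorbis

set_option maxRecDepth 4000
set_option maxHeartbeats 4000000

namespace Vorbis.Spec.get_bits_24

/-- The prologue's stores — four pushes, then the return address of a check call at `rsp - 48` — all off `*f`: `Bits`, μ and
`valid_bits` are kept. -/
theorem entry_stores {Blk : Block → Prop} {len : Nat} {M : Mem} {f : Nat} (h : Bits Blk len M f) (p1 p2 p3 p4 p5 : Word)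
    (r1 r2 r3 r4 r5 : Nat) (l1 : p1.toNat + 8 < 2 ^ 64) (l2 : p2.toNat + 8 < 2 ^ 64) (l3 : p3.toNat + 8 < 2 ^ 64)
    (l4 : p4.toNat + 8 < 2 ^ 64) (l5 : p5.toNat + 8 < 2 ^ 64) (d1 : p1.toNat + 8 ≤ f ∨ f + 1808 ≤ p1.toNat)
    (d2 : p2.toNat + 8 ≤ f ∨ f + 1808 ≤ p2.toNat) (d3 : p3.toNat + 8 ≤ f ∨ f + 1808 ≤ p3.toNat)
    (d4 : p4.toNat + 8 ≤ f ∨ f + 1808 ≤ p4.toNat) (d5 : p5.toNat + 8 ≤ f ∨ f + 1808 ≤ p5.toNat) :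
    Bits Blk len (((((M.writeLE p1 8 r1).writeLE p2 8 r2).writeLE p3 8 r3).writeLE p4 8 r4).writeLE p5 8 r5) f ∧
      mu (((((M.writeLE p1 8 r1).writeLE p2 8 r2).writeLE p3 8 r3).writeLE p4 8 r4).writeLE p5 8 r5) f = mu M f ∧
      stb_vorbis.valid_bits (((((M.writeLE p1 8 r1).writeLE p2 8 r2).writeLE p3 8 r3).writeLE p4 8 r4).writeLE p5 8 r5) f =
        stb_vorbis.valid_bits M f := by
  have k4 := Vorbis.Spec.BitReader.four_pushes h p1 p2 p3 p4 r1 r2 r3 r4 l1 l2 l3 l4 d1 d2 d3 d4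
  have k5 := Vorbis.Spec.BitReader.stack_store k4.1 p5 r5 l5 d5
  exact ⟨k5.1, k5.2.1.trans k4.2.1, k5.2.2.trans k4.2.2⟩

/-- The same followed by the store `f->acc = 0` (0x10d209), in the walker's address form. -/
theorem entry_stores_acc {Blk : Block → Prop} {len : Nat} {M : Mem} {f : Nat} (h : Bits Blk len M f) (p1 p2 p3 p4 p5 : Word)
    (r1 r2 r3 r4 r5 : Nat) (l1 : p1.toNat + 8 < 2 ^ 64) (l2 : p2.toNat + 8 < 2 ^ 64) (l3 : p3.toNat + 8 < 2 ^ 64)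
    (l4 : p4.toNat + 8 < 2 ^ 64) (l5 : p5.toNat + 8 < 2 ^ 64) (d1 : p1.toNat + 8 ≤ f ∨ f + 1808 ≤ p1.toNat)
    (d2 : p2.toNat + 8 ≤ f ∨ f + 1808 ≤ p2.toNat) (d3 : p3.toNat + 8 ≤ f ∨ f + 1808 ≤ p3.toNat)
    (d4 : p4.toNat + 8 ≤ f ∨ f + 1808 ≤ p4.toNat) (d5 : p5.toNat + 8 ≤ f ∨ f + 1808 ≤ p5.toNat) (A : Nat) :
    Bits Blk len ((((((M.writeLE p1 8 r1).writeLE p2 8 r2).writeLE p3 8 r3).writeLE p4 8 r4).writeLE p5 8 r5).writeLE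
        (addr f + 1764) 4 A) f ∧
      mu ((((((M.writeLE p1 8 r1).writeLE p2 8 r2).writeLE p3 8 r3).writeLE p4 8 r4).writeLE p5 8 r5).writeLE
        (addr f + 1764) 4 A) f = mu M f := by
  have k5 := entry_stores h p1 p2 p3 p4 p5 r1 r2 r3 r4 r5 l1 l2 l3 l4 l5 d1 d2 d3 d4 d5
  rw [addr_add_lit]
  have k6 := Vorbis.Spec.BitReader.acc_store k5.1 A
  exact ⟨k6.1, k6.2.1.trans k5.2.1⟩

end Vorbis.Spec.get_bits_24

/-- **`get_bits(f, n)`, stage 1 (`n ≤ 24`), satisfies `get_bits.spec24`** (CONTRACTS 50; stb_vorbis_fixed.c:1627–1655).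
ONE walk from the entry (0x10d1c0) to the loop head (0x10d213, `Vorbis.L.get_bits.loop1`) or a `ret`:
  * `js` taken (0x10d2ef, `valid_bits < 0`): `return 0`, nothing of `*f` written — `GetBits.post_eop`;
  * `jge` taken (0x10d2ac, `n ≤ valid_bits`): the extraction — `take_post` over the four pushes;
  * `jg` taken (0x10d26c, `n > 24`, the recursive arm): pruned by the walker from `hnI`, `hn24`;
  * the loop head, with `valid_bits ≠ 0` (`s_10d1fb`) or through `f->acc = 0` (`s_10d209`): `loop_ok` of Lemmas.lean, which walks
    the loop `while (f->valid_bits < n)` (measure μ), its end-of-packet exit and the extraction after it, to the `ret`. -/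
theorem Vorbis.Spec.Worked.get_bits_24_ok : Vorbis.Spec.get_bits_24.Statement := by
  intro Lay hLay μ hμ u₀ hcode hload4 hstore4 h_raw others frames Blk len u ret he hpre
  v_entry he
  have hraw := h_raw others frames Blk len
  obtain ⟨hpre, hn24⟩ := hpre
  have hsp := hpre.shadow.rsp
  have hwhere := hpre.where_obj
  -- `f`, the object's address as a number; `n`, the argument
  obtain ⟨f, hf⟩ : ∃ f : Nat, (u.reg .rdi).toNat = f := ⟨_, rfl⟩
  have hr : u.reg .rdi = addr f := eq_addr _ _ hf
  have hbits : Bits Blk len u.mem f := hf ▸ hpre.bits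
  have hfa : (addr f).toNat = f := toNat_addr f (by omega)
  obtain ⟨n, hn⟩ : ∃ n : Nat, (u.reg .rsi).toNat % 2 ^ 32 = n := ⟨_, rfl⟩
  rw [Vorbis.Spec.bitsArg_def, hn] at hn24
  have hnI : (Word.part Width.w32 (u.reg .rsi)).toInt = (n : Int) := by
    rw [← hn]
    exact Vorbis.Spec.BitReader.arg_toInt _ (by omega)
  have hN : (Word.part Width.w32 (u.reg .rsi)).toNat = n := by
    rw [Asan.part32_toNat]
    exact hn
  -- the load of `valid_bits`, named
  obtain ⟨m0, hm0⟩ : ∃ m : Nat, u.mem.readLE (addr f + 1768) 4 = m := ⟨_, rfl⟩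
  have hvbc := Vorbis.Spec.PrepHuffman.vb_cases u.mem f m0 hm0
  have hV1 := hbits.V1
  have hm0lt : m0 < 2 ^ 32 := by omega
  have e24 : (24#32).toInt = 24 := by decide
  u_walk hcode [hμ.vendor] until [Vorbis.L.get_bits.loop1] span [Vorbis.L.textLo, Vorbis.L.textHi] side (v_side)
  case check_10d1d7 =>
    -- 0x10d1d7, load4 [f + 1768] (`f->valid_bits`)
    have hun' : ShadowUntouched u.mem s_10d1d7.mem := by v_untouched
    refine hpre.env.obj.accSmall hpre.shadow.inv hun' _ 4 (by decide) (by u_omega) ?_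
    simp only [Vorbis.Off.sizeof.stb_vorbis]
    u_omega
  case check_10d2b3 =>
    -- 0x10d2b3, load4 [f + 1764] (`f->acc`)
    have hun' : ShadowUntouched u.mem s_10d2b3.mem := by v_untouched
    refine hpre.env.obj.accSmall hpre.shadow.inv hun' _ 4 (by decide) (by u_omega) ?_
    simp only [Vorbis.Off.sizeof.stb_vorbis]
    u_omega
  case check_10d204 =>
    -- 0x10d204, store4 [f + 1764] (`f->acc = 0`)
    have hun' : ShadowUntouched u.mem s_10d204.mem := by v_untouched
    refine hpre.env.obj.accSmall hpre.shadow.inv hun' _ 4 (by decide) (by u_omega) ?_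
    simp only [Vorbis.Off.sizeof.stb_vorbis]
    u_omega
  · -- 0x10d2ef (`js` taken): `valid_bits < 0`, `return 0`, nothing of `*f` written
    have hge : 2 ^ 31 ≤ m0 := by
      rw [Vorbis.Spec.GetBits.msb_ofNat32 m0 hm0lt] at hbr_10d1e4
      exact of_decide_eq_true hbr_10d1e4
    have hneg : stb_vorbis.valid_bits u.mem f < 0 := by omega
    refine ReachVia.done ?_
    v_returned
    show Vorbis.Spec.GetBitsSpecPost Blk len (u.reg .rdi).toNat (Vorbis.Spec.bitsArg u) u s_10d2ee
    rw [hf, Vorbis.Spec.bitsArg_def, hn]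
    refine ⟨by v_untouched, ?_⟩
    have hE : Mem.EqOn f (f + 1808) u.mem s_10d2ee.mem := by
      u_memnorm
      u_eqon
    have e0 : (Word.ofBV 0#32).toNat = 0 := rfl
    rw [w_rax, e0]
    exact Vorbis.Spec.GetBits.post_eop n hbits hE hneg
  · -- 0x10d2ac from the entry (`jge` taken: `n ≤ valid_bits`): the extraction
    have hlt31 : ¬ 2 ^ 31 ≤ m0 := by
      rw [Vorbis.Spec.GetBits.msb_ofNat32 m0 hm0lt] at hbr_10d1e4
      exact of_decide_eq_false hbr_10d1e4
    have hvb : stb_vorbis.valid_bits u.mem f = (m0 : Int) := by omega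
    have hnm : n ≤ m0 := by
      rw [hnI, Vorbis.Spec.get_bits_24.ofNat32_toInt m0 (by omega)] at hbr_10d1ed
      omega
    refine ReachVia.done ?_
    v_returned
    show Vorbis.Spec.GetBitsSpecPost Blk len (u.reg .rdi).toNat (Vorbis.Spec.bitsArg u) u s_10d2ee
    rw [hf, Vorbis.Spec.bitsArg_def, hn]
    refine ⟨by v_untouched, ?_⟩
    have k := Vorbis.Spec.BitReader.four_pushes hbits (u.reg .rsp - 8) (u.reg .rsp - 16) (u.reg .rsp - 24)
      (u.reg .rsp - 32) (u.reg .r13).toNat (u.reg .r12).toNat (u.reg .rbp).toNat (u.reg .rbx).toNat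
      (by u_omega) (by u_omega) (by u_omega) (by u_omega) (by u_omega) (by u_omega) (by u_omega) (by u_omega)
    rw [w_mem, w_rax]
    refine Vorbis.Spec.get_bits_24.take_post k.1 (Nat.le_of_eq k.2.1) (by omega) ?_ _ _ (by u_omega) (by u_omega)
      _ _ ?_ (Vorbis.Spec.BitReader.take_result _ _ n hN hn24)
    · intro h0 hn1
      omega
    · have e := Vorbis.Spec.GetBits.sub_toInt m0 (Word.part Width.w32 (u.reg .rsi)) (by omega) (by omega)
      rw [e, hN]
      omega
  · -- 0x10d213, the loop head, reached with `0 < valid_bits < n`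
    have hlt31 : ¬ 2 ^ 31 ≤ m0 := by
      rw [Vorbis.Spec.GetBits.msb_ofNat32 m0 hm0lt] at hbr_10d1e4
      exact of_decide_eq_false hbr_10d1e4
    have hvb : stb_vorbis.valid_bits u.mem f = (m0 : Int) := by omega
    have hmn : m0 < n := by
      rw [hnI, Vorbis.Spec.get_bits_24.ofNat32_toInt m0 (by omega)] at hbr_10d1ed
      omega
    have hk := Vorbis.Spec.get_bits_24.entry_stores hbits (u.reg .rsp - 8) (u.reg .rsp - 16) (u.reg .rsp - 24)
      (u.reg .rsp - 32) (u.reg .rsp - 48) (u.reg .r13).toNat (u.reg .r12).toNat (u.reg .rbp).toNat (u.reg .rbx).toNat 1102300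
      (by u_omega) (by u_omega) (by u_omega) (by u_omega) (by u_omega) (by u_omega) (by u_omega) (by u_omega)
      (by u_omega) (by u_omega)
    rw [← w_mem] at hk
    refine Vorbis.Spec.get_bits_24.loop_ok Lay hLay μ hμ u₀ hcode hload4 hstore4 others frames Blk len hraw u ret he hpre
      f n hf hn hn24 (by omega) s_10d1fb m0 w_rip w_r12 w_rbx w_rsp w_kept w_eq ?_ ?_ ?_ ?_ ?_ ?_ ?_ ?_ ?_
      ⟨hk.1, Nat.le_of_eq hk.2.1⟩ ?_ (by omega) ?_
    · u_same
    · v_untouched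
    · u_resolve
    · u_resolve
    · u_resolve
    · u_resolve
    · u_resolve
    · rw [w_flags]
      simp only [X86.User.df_setStatus]
      exact w_df_10d1d7
    · rw [w_mxcsr]
      exact he_mx
    · u_resolve
    · intro h0
      left
      omega
  · -- 0x10d213, the loop head, reached with `valid_bits = 0` through `f->acc = 0`
    have hm00 : m0 = 0 := by omega
    have hvb : stb_vorbis.valid_bits u.mem f = (m0 : Int) := by omega
    have hk := Vorbis.Spec.get_bits_24.entry_stores_acc hbits (u.reg .rsp - 8) (u.reg .rsp - 16) (u.reg .rsp - 24)
      (u.reg .rsp - 32) (u.reg .rsp - 48) (u.reg .r13).toNat (u.reg .r12).toNat (u.reg .rbp).toNat (u.reg .rbx).toNat 1102345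
      (by u_omega) (by u_omega) (by u_omega) (by u_omega) (by u_omega) (by u_omega) (by u_omega) (by u_omega)
      (by u_omega) (by u_omega) 0
    rw [← w_mem] at hk
    refine Vorbis.Spec.get_bits_24.loop_ok Lay hLay μ hμ u₀ hcode hload4 hstore4 others frames Blk len hraw u ret he hpre
      f n hf hn hn24 (by omega) s_10d209 m0 w_rip w_r12 w_rbx w_rsp w_kept w_eq ?_ ?_ ?_ ?_ ?_ ?_ ?_ ?_ ?_
      ⟨hk.1, Nat.le_of_eq hk.2⟩ ?_ (by omega) ?_
    · u_same
    · v_untouched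
    · u_resolve
    · u_resolve
    · u_resolve
    · u_resolve
    · u_resolve
    · rw [w_flags]
      exact w_df_10d204
    · rw [w_mxcsr]
      exact he_mx
    · u_resolve
    · intro h0
      left
      exact hm00
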